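-- pv_equiv track=rewrite | github.com/v1docq/FedCore | fedcore/models/network_modules/reversible.py | route_args
-- ===== SOURCE A (Python) =====
-- from typing import Any, Dict, List, Tuple, Optional
--
-- def route_args(
--         router: Dict[str, List[Tuple[bool, bool]]],
--         args: Dict[str, Any],
--         depth: int
-- ) -> List[Tuple[Dict[str, Any], Dict[str, Any]]]:
--     """Routes input arguments to reversible layers.
--
--     Args:
--         router: Maps argument names to routing rules for each layer.
--             Example: {"mask": [(True, False), (False, True)]}.
--         args: Input arguments to distribute.
--         depth: Number of reversible layers.
--
--     Returns:
--         List of (f_args, g_args) for each layer.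
--     """
--     routed_args = [({}, {}) for _ in range(depth)]
--     for key in args.keys() & router.keys():
--         for layer_idx, (routes, (f_args, g_args)) in enumerate(zip(router[key], routed_args)):
--             new_f = {key: args[key]} if routes[0] else {}
--             new_g = {key: args[key]} if routes[1] else {}
--             routed_args[layer_idx] = ({**f_args, **new_f}, {**g_args, **new_g})
--     return routed_args
-- ===== SOURCE B (Python) =====
-- def route_args(router, args, depth):
--     """Layer-outer re-implementation: build each layer's (f_args, g_args) pair
--     independently, with no shared-list mutation. Layers beyond every rule list
--     are empty, so the per-key work stops at the longest rule list."""
--     keys = [k for k in args if k in router]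
--     maxlen = 0
--     for k in keys:
--         maxlen = max(maxlen, len(router[k]))
--     bound = min(depth, maxlen)
--     out = []
--     for layer in range(bound):
--         f_args = {}
--         g_args = {}
--         for k in keys:
--             rules = router[k]
--             if layer < len(rules):
--                 rf, rg = rules[layer]
--                 if rf:
--                     f_args[k] = args[k]
--                 if rg:
--                     g_args[k] = args[k]
--         out.append((f_args, g_args))
--     out.extend(({}, {}) for _ in range(depth - bound))
--     return out
-- ===== Notes on version B (the rewrite author's own statement) =====
-- stated objective: alternative
-- what changed: Inverted the loop nesting: instead of iterating keys and repeatedly rewriting a shared list of layer pairs, B iterates layers (up to the longest rule list, padding the remaining layers with empty pairs) and builds each layer's (f_args, g_args) pair independently from scratch, with no mutation of a shared list.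
import Mathlib
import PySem

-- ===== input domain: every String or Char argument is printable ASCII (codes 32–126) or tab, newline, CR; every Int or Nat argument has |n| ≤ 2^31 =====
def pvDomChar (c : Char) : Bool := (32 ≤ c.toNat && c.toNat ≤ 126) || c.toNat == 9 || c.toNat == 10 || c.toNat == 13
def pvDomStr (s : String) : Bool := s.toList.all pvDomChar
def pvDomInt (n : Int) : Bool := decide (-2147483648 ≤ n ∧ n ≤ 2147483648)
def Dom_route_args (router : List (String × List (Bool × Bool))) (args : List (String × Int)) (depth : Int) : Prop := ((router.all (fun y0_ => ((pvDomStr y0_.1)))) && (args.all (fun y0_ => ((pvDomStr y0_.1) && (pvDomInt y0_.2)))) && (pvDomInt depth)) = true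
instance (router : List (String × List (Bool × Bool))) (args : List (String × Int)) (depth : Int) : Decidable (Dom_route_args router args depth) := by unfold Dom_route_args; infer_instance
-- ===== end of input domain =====

-- B inverts A's loop nesting (layer-outer instead of key-outer), building each layer's pair
-- independently; same cost, no shared-list mutation. Return values proved equal on all inputs.

-- shared Python-dict primitive: d[k] = v — overwrite in place, new keys append
-- (exact for {**d, **{k: v}} on a duplicate-free association list)
def pyInsert (d : List (String × Int)) (k : String) (v : Int) : List (String × Int) :=
  match d with
  | [] => [(k, v)]
  | (k', v') :: rest => if k' = k then (k, v) :: rest else (k', v') :: pyInsert rest k v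

-- ===== PORT A =====
-- inner 'for layer_idx, (routes, (f_args, g_args)) in enumerate(zip(router[key], routed_args))'
-- loop: rewrites the prefix of routed_args covered by the rule list (zip truncation).
def raInner (k : String) (v : Int) :
    List (Bool × Bool) → List ((List (String × Int)) × (List (String × Int))) →
    List ((List (String × Int)) × (List (String × Int)))
  | [], racc => racc
  | _ :: _, [] => []
  | r :: rs, fg :: rest =>
      ((if r.1 then pyInsert fg.1 k v else fg.1),
       (if r.2 then pyInsert fg.2 k v else fg.2)) :: raInner k v rs rest

-- 'args.keys() & router.keys()' is a Python set (arbitrary hash order); output dicts are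
-- compared order-insensitively, so the port fixes args insertion order for the intersection.
def route_args (router : List (String × List (Bool × Bool))) (args : List (String × Int)) (depth : Int) : List ((List (String × Int)) × (List (String × Int))) :=
  ((args.map Prod.fst).filter (fun k => (router.lookup k).isSome)).foldl
    (fun racc k => raInner k ((args.lookup k).getD 0) ((router.lookup k).getD []) racc)
    (List.replicate depth.toNat ([], []))

-- ===== PORT B =====
-- one layer's (f_args, g_args), built by the inner 'for k in keys' loop of Source B
def raLayer (router : List (String × List (Bool × Bool))) (args : List (String × Int))
    (keys : List String) (layer : Nat) : (List (String × Int)) × (List (String × Int)) :=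
  keys.foldl
    (fun fg k =>
      let rules := (router.lookup k).getD []
      if layer < rules.length then
        let r := rules.getD layer (false, false)
        ((if r.1 then pyInsert fg.1 k ((args.lookup k).getD 0) else fg.1),
         (if r.2 then pyInsert fg.2 k ((args.lookup k).getD 0) else fg.2))
      else fg)
    ([], [])

def route_args_alt (router : List (String × List (Bool × Bool))) (args : List (String × Int)) (depth : Int) : List ((List (String × Int)) × (List (String × Int))) :=
  let keys := (args.map Prod.fst).filter (fun k => (router.lookup k).isSome)
  let maxlen : Int := keys.foldl (fun m k => max m (((router.lookup k).getD []).length : Int)) 0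
  let bound : Int := min depth maxlen
  ((List.range bound.toNat).map (fun layer => raLayer router args keys layer))
    ++ List.replicate (depth - bound).toNat ([], [])

-- ===== PRECONDITION & SPEC =====
def Spec_route_args (router : List (String × List (Bool × Bool))) (args : List (String × Int)) (depth : Int) (out : List ((List (String × Int)) × (List (String × Int)))) : Prop := out = route_args_alt router args depth
instance (router : List (String × List (Bool × Bool))) (args : List (String × Int)) (depth : Int) (out : List ((List (String × Int)) × (List (String × Int)))) : Decidable (Spec_route_args router args depth out) := by unfold Spec_route_args; infer_instance

-- ===== CLAIM (what is proved, stated in full; the proofs are below) =====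
def Claim_equal_route_args : Prop := ∀ (router : List (String × List (Bool × Bool))) (args : List (String × Int)) (depth : Int), Dom_route_args router args depth → Spec_route_args router args depth (route_args router args depth)

-- ===== LEMMAS AND PROOFS =====

theorem raInner_length (k : String) (v : Int) (rules : List (Bool × Bool))
    (racc : List ((List (String × Int)) × (List (String × Int)))) :
    (raInner k v rules racc).length = racc.length := by
  induction racc generalizing rules with
  | nil => cases rules <;> rfl
  | cons fg rest ih => cases rules with
    | nil => rfl
    | cons r rs => simp [raInner, ih]

theorem raInner_getD (k : String) (v : Int) (rules : List (Bool × Bool))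
    (racc : List ((List (String × Int)) × (List (String × Int)))) (i : Nat)
    (h : i < racc.length) :
    (raInner k v rules racc).getD i ([], []) =
      if i < rules.length then
        let r := rules.getD i (false, false)
        ((if r.1 then pyInsert (racc.getD i ([], [])).1 k v else (racc.getD i ([], [])).1),
         (if r.2 then pyInsert (racc.getD i ([], [])).2 k v else (racc.getD i ([], [])).2))
      else racc.getD i ([], []) := by
  induction racc generalizing rules i with
  | nil => simp at h
  | cons fg rest ih =>
    cases rules with
    | nil => simp [raInner]
    | cons r rs =>
      cases i with
      | zero => simp [raInner]
      | succ j =>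
        have hj : j < rest.length := by simpa using h
        simpa [raInner, Nat.succ_lt_succ_iff] using ih rs j hj

theorem foldA_length (router : List (String × List (Bool × Bool))) (args : List (String × Int))
    (ks : List String) (racc : List ((List (String × Int)) × (List (String × Int)))) :
    (ks.foldl (fun racc k => raInner k ((args.lookup k).getD 0) ((router.lookup k).getD []) racc) racc).length
      = racc.length := by
  induction ks generalizing racc with
  | nil => rfl
  | cons a ks ih => simp [List.foldl, ih, raInner_length]

theorem foldA_getD (router : List (String × List (Bool × Bool))) (args : List (String × Int))
    (ks : List String) (racc : List ((List (String × Int)) × (List (String × Int)))) (i : Nat)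
    (h : i < racc.length) :
    (ks.foldl (fun racc k => raInner k ((args.lookup k).getD 0) ((router.lookup k).getD []) racc) racc).getD i ([], [])
      = ks.foldl
          (fun fg k =>
            let rules := (router.lookup k).getD []
            if i < rules.length then
              let r := rules.getD i (false, false)
              ((if r.1 then pyInsert fg.1 k ((args.lookup k).getD 0) else fg.1),
               (if r.2 then pyInsert fg.2 k ((args.lookup k).getD 0) else fg.2))
            else fg)
          (racc.getD i ([], [])) := by
  induction ks generalizing racc with
  | nil => rfl
  | cons a ks ih =>
    have hlen : i < (raInner a ((args.lookup a).getD 0) ((router.lookup a).getD []) racc).length := by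
      simpa [raInner_length] using h
    have := ih (raInner a ((args.lookup a).getD 0) ((router.lookup a).getD []) racc) hlen
    simp only [List.foldl] at this ⊢
    rw [this, raInner_getD _ _ _ _ _ h]

theorem route_args_eq_full (router : List (String × List (Bool × Bool)))
    (args : List (String × Int)) (depth : Int) :
    route_args router args depth
      = (List.range depth.toNat).map
          (raLayer router args ((args.map Prod.fst).filter (fun k => (router.lookup k).isSome))) := by
  apply List.ext_getElem
  · simp [route_args, foldA_length]
  · intro i h1 h2
    have hi : i < depth.toNat := by simpa [route_args, foldA_length] using h1
    rw [← List.getD_eq_getElem _ ([], []) h1, ← List.getD_eq_getElem _ ([], []) h2]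
    simp only [route_args]
    rw [foldA_getD router args _ _ i (by simpa using hi)]
    rw [List.getD_eq_getElem _ ([], []) (by simpa using hi),
        List.getD_eq_getElem _ ([], []) (by simpa using hi)]
    simp [raLayer]

theorem le_foldl_max (g : String → Int) (l : List String) (a : Int) :
    a ≤ l.foldl (fun m k => max m (g k)) a := by
  induction l generalizing a with
  | nil => exact le_refl a
  | cons x xs ih => exact le_trans (le_max_left a (g x)) (ih (max a (g x)))

theorem mem_le_foldl_max (g : String → Int) (l : List String) (a : Int) (k : String)
    (hk : k ∈ l) : g k ≤ l.foldl (fun m k => max m (g k)) a := by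
  induction l generalizing a with
  | nil => simp at hk
  | cons x xs ih =>
    rcases List.mem_cons.mp hk with h | h
    · subst h
      exact le_trans (le_max_right a (g k)) (le_foldl_max g xs (max a (g k)))
    · exact ih _ h

theorem raLayer_empty (router : List (String × List (Bool × Bool))) (args : List (String × Int))
    (keys : List String) (layer : Nat)
    (h : ∀ k ∈ keys, ((router.lookup k).getD []).length ≤ layer) :
    raLayer router args keys layer = ([], []) := by
  unfold raLayer
  induction keys with
  | nil => rfl
  | cons x xs ih =>
    have hx : ¬ layer < ((router.lookup x).getD []).length :=
      Nat.not_lt.mpr (h x (List.mem_cons_self))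
    simp only [List.foldl, hx, if_false]
    exact ih (fun k hk => h k (List.mem_cons_of_mem x hk))

theorem route_args_eq_alt (router : List (String × List (Bool × Bool)))
    (args : List (String × Int)) (depth : Int) :
    route_args router args depth = route_args_alt router args depth := by
  rw [route_args_eq_full]
  simp only [route_args_alt]
  set keys := (args.map Prod.fst).filter (fun k => (router.lookup k).isSome) with hkeys
  set maxlen : Int := keys.foldl (fun m k => max m (((router.lookup k).getD []).length : Int)) 0 with hml
  have hml0 : 0 ≤ maxlen := le_foldl_max _ keys 0
  set bound : Int := min depth maxlen with hb
  apply List.ext_getElem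
  · simp only [List.length_map, List.length_range, List.length_append, List.length_replicate]
    omega
  · intro i h1 h2
    have hi : i < depth.toNat := by simpa using h1
    rw [List.getElem_map, List.getElem_range]
    by_cases hib : i < bound.toNat
    · rw [List.getElem_append_left (by simpa using hib)]
      rw [List.getElem_map, List.getElem_range]
    · rw [List.getElem_append_right (by simpa using hib)]
      rw [List.getElem_replicate]
      apply raLayer_empty
      intro k hk
      have hlek : (((router.lookup k).getD []).length : Int) ≤ maxlen :=
        mem_le_foldl_max _ keys 0 k hk
      -- i ≥ bound.toNat and i < depth.toNat force bound = maxlen ≤ i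
      omega

-- ===== VERDICT (by name: the statement is the Claim_ definition above) =====
theorem route_args_spec : Claim_equal_route_args := by
  intro router args depth _
  exact route_args_eq_alt router args depth
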